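-- pv_equiv track=rewrite | github.com/amit-berlin/Policy-Analyzer- | app.py | kpi_pack
-- ===== SOURCE A (Python) =====
-- def kpi_pack(theme_words):
--     themes = " ".join(theme_words)
--     pack = []
--     if any(t in themes for t in ["education","school","skill"]):
--         pack += ["Gross Enrollment Ratio", "Learning outcomes (ASER-like)", "Teacher attendance", "Placement rate"]
--     if any(t in themes for t in ["health","hospital","malnutrition"]):
--         pack += ["OPD footfall", "Stock-out days", "Telemedicine calls", "Anaemia prevalence"]
--     if any(t in themes for t in ["farmer","agriculture"]):
--         pack += ["Yield per acre", "Irrigation coverage", "Insurance claims TAT", "FPOs formed"]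
--     if any(t in themes for t in ["water","road","urban"]):
--         pack += ["NRW %", "Pothole closure TAT", "Grievance closure SLA", "Contract adherence"]
--     if any(t in themes for t in ["portal","grievance","service"]):
--         pack += ["Uptime %", "Avg response time", "First-contact resolution", "Escalations %"]
--     if not pack:
--         pack = ["Coverage % of target group", "On-time service delivery %", "Beneficiary satisfaction", "Grievance TAT"]
--     return pack[:4]
-- ===== SOURCE B (Python) =====
-- KPI_TABLE = [
--     (["education", "school", "skill"],
--      ["Gross Enrollment Ratio", "Learning outcomes (ASER-like)", "Teacher attendance", "Placement rate"]),
--     (["health", "hospital", "malnutrition"],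
--      ["OPD footfall", "Stock-out days", "Telemedicine calls", "Anaemia prevalence"]),
--     (["farmer", "agriculture"],
--      ["Yield per acre", "Irrigation coverage", "Insurance claims TAT", "FPOs formed"]),
--     (["water", "road", "urban"],
--      ["NRW %", "Pothole closure TAT", "Grievance closure SLA", "Contract adherence"]),
--     (["portal", "grievance", "service"],
--      ["Uptime %", "Avg response time", "First-contact resolution", "Escalations %"]),
-- ]
--
-- DEFAULT_KPIS = ["Coverage % of target group", "On-time service delivery %",
--                 "Beneficiary satisfaction", "Grievance TAT"]
--
--
-- def kpi_pack(theme_words):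
--     themes = " ".join(theme_words)
--     for keywords, kpis in KPI_TABLE:
--         if any(t in themes for t in keywords):
--             return list(kpis)
--     return list(DEFAULT_KPIS)
-- ===== Notes on version B (the rewrite author's own statement) =====
-- stated objective: simpler
-- what changed: Replaced the append-all-matches-then-truncate if-chain with a (keywords, kpis) table scanned once, returning the first matching category's list immediately (default if none), which is equivalent because each block appends exactly four KPIs so pack[:4] is always the first match.
import Mathlib
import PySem

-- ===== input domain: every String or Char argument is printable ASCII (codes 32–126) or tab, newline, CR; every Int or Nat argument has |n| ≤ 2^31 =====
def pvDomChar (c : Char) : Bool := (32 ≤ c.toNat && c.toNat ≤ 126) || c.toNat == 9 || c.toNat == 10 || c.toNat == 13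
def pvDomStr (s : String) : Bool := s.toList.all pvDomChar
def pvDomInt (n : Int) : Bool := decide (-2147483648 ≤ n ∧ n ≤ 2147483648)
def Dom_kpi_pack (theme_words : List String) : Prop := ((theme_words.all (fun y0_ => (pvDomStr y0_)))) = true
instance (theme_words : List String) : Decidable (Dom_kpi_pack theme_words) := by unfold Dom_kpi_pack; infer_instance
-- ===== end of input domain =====

-- B replaces the append-then-truncate if-chain with a first-match table scan (simpler; same result since each block adds exactly four KPIs).


-- ===== PORT A =====
def kpi_pack (theme_words : List String) : List String :=
  let themes := PySem.Str.join " " theme_words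
  let pack : List String := []
  let pack := if ["education","school","skill"].any (fun t => PySem.Str.isIn t themes) then
      pack ++ ["Gross Enrollment Ratio", "Learning outcomes (ASER-like)", "Teacher attendance", "Placement rate"]
    else pack
  let pack := if ["health","hospital","malnutrition"].any (fun t => PySem.Str.isIn t themes) then
      pack ++ ["OPD footfall", "Stock-out days", "Telemedicine calls", "Anaemia prevalence"]
    else pack
  let pack := if ["farmer","agriculture"].any (fun t => PySem.Str.isIn t themes) then
      pack ++ ["Yield per acre", "Irrigation coverage", "Insurance claims TAT", "FPOs formed"]
    else pack
  let pack := if ["water","road","urban"].any (fun t => PySem.Str.isIn t themes) then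
      pack ++ ["NRW %", "Pothole closure TAT", "Grievance closure SLA", "Contract adherence"]
    else pack
  let pack := if ["portal","grievance","service"].any (fun t => PySem.Str.isIn t themes) then
      pack ++ ["Uptime %", "Avg response time", "First-contact resolution", "Escalations %"]
    else pack
  let pack := if pack = [] then
      ["Coverage % of target group", "On-time service delivery %", "Beneficiary satisfaction", "Grievance TAT"]
    else pack
  PySem.List.slice pack none (some 4)

-- ===== PORT B =====
def kpiTable : List (List String × List String) :=
  [(["education","school","skill"],
    ["Gross Enrollment Ratio", "Learning outcomes (ASER-like)", "Teacher attendance", "Placement rate"]),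
   (["health","hospital","malnutrition"],
    ["OPD footfall", "Stock-out days", "Telemedicine calls", "Anaemia prevalence"]),
   (["farmer","agriculture"],
    ["Yield per acre", "Irrigation coverage", "Insurance claims TAT", "FPOs formed"]),
   (["water","road","urban"],
    ["NRW %", "Pothole closure TAT", "Grievance closure SLA", "Contract adherence"]),
   (["portal","grievance","service"],
    ["Uptime %", "Avg response time", "First-contact resolution", "Escalations %"])]

def kpiDefault : List String :=
  ["Coverage % of target group", "On-time service delivery %", "Beneficiary satisfaction", "Grievance TAT"]

-- first-match scan over the table, early return
def kpiFirst (themes : String) : List (List String × List String) → List String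
  | [] => kpiDefault
  | (kws, kpis) :: rest =>
      if kws.any (fun t => PySem.Str.isIn t themes) then kpis else kpiFirst themes rest

def kpi_pack_alt (theme_words : List String) : List String :=
  let themes := PySem.Str.join " " theme_words
  kpiFirst themes kpiTable

-- ===== PRECONDITION & SPEC =====
def Spec_kpi_pack (theme_words : List String) (out : List String) : Prop := out = kpi_pack_alt theme_words
instance (theme_words : List String) (out : List String) : Decidable (Spec_kpi_pack theme_words out) := by unfold Spec_kpi_pack; infer_instance

-- ===== CLAIM (what is proved, stated in full; the proofs are below) =====
def Claim_equal_kpi_pack : Prop := ∀ (theme_words : List String), Dom_kpi_pack theme_words → Spec_kpi_pack theme_words (kpi_pack theme_words)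

-- ===== LEMMAS AND PROOFS =====

-- both programs depend only on the joined string; case-split the five category tests
theorem kpi_pack_eq_alt (theme_words : List String) :
    kpi_pack theme_words = kpi_pack_alt theme_words := by
  simp only [kpi_pack, kpi_pack_alt, kpiFirst, kpiTable, kpiDefault]
  generalize (["education","school","skill"].any
      (fun t => PySem.Str.isIn t (PySem.Str.join " " theme_words))) = b1
  generalize (["health","hospital","malnutrition"].any
      (fun t => PySem.Str.isIn t (PySem.Str.join " " theme_words))) = b2
  generalize (["farmer","agriculture"].any
      (fun t => PySem.Str.isIn t (PySem.Str.join " " theme_words))) = b3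
  generalize (["water","road","urban"].any
      (fun t => PySem.Str.isIn t (PySem.Str.join " " theme_words))) = b4
  generalize (["portal","grievance","service"].any
      (fun t => PySem.Str.isIn t (PySem.Str.join " " theme_words))) = b5
  cases b1 <;> cases b2 <;> cases b3 <;> cases b4 <;> cases b5 <;> rfl

-- ===== VERDICT (by name: the statement is the Claim_ definition above) =====
theorem kpi_pack_spec : Claim_equal_kpi_pack := by
  intro tw _
  unfold Spec_kpi_pack
  exact kpi_pack_eq_alt tw
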